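-- pv_equiv track=rewrite | github.com/mengruitu/openai_register | register_app/proxy_pool.py | _merge_proxies
-- ===== SOURCE A (Python) =====
-- def _merge_proxies(existing: list[str], incoming: list[str]) -> tuple[list[str], int]:
--     merged: list[str] = []
--     seen: set[str] = set()
--     for item in existing:
--         value = str(item or "").strip()
--         if not value or value in seen:
--             continue
--         seen.add(value)
--         merged.append(value)
--     added = 0
--     for item in incoming:
--         value = str(item or "").strip()
--         if not value or value in seen:
--             continue
--         seen.add(value)
--         merged.append(value)
--         added += 1
--     return merged, added
-- ===== SOURCE B (Python) =====
-- def _merge_proxies(existing: list[str], incoming: list[str]) -> tuple[list[str], int]: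
--     def dedup(items: list[str]) -> list[str]:
--         out: list[str] = []
--         seen: set[str] = set()
--         for item in items:
--             v = str(item or "").strip()
--             if v and v not in seen:
--                 out.append(v)
--                 seen.add(v)
--         return out
--
--     base = dedup(existing)
--     merged = dedup(existing + incoming)
--     return merged, len(merged) - len(base)
-- ===== Notes on version B (the rewrite author's own statement) =====
-- stated objective: simpler
-- what changed: One order-preserving dedup helper applied to existing and to existing+incoming; the new-item count is derived as a length difference instead of a second loop with an inline counter.
import Mathlib
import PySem

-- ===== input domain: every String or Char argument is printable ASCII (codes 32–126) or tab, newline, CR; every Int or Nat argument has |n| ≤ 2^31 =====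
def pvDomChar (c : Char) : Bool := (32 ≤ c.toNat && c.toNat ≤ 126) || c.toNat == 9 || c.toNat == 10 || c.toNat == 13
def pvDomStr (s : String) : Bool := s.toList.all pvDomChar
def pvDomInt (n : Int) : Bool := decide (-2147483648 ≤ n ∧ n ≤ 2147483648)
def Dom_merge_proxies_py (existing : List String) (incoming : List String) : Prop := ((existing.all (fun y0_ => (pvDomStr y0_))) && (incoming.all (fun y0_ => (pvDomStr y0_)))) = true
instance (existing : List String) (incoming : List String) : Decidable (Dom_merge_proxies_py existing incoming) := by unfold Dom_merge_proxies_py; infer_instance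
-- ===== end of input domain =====

-- B replaces A's two inline loops by one order-preserving dedup helper used twice,
-- deriving the new-item count as a length difference (objective: simpler).


-- ===== PORT A =====
-- loop body of A's first loop (value = str(item or "").strip(); skip empty or seen; else append+add)
def pvStepA (st : List String × PySem.Set String) (item : String) : List String × PySem.Set String :=
  let value := PySem.Str.strip (if item = "" then "" else item)
  if value = "" ∨ PySem.Set.contains st.2 value then st
  else (st.1 ++ [value], PySem.Set.add st.2 value)

-- loop body of A's second loop (same, also incrementing added)
def pvStepA2 (st : (List String × PySem.Set String) × Int) (item : String) : (List String × PySem.Set String) × Int :=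
  let value := PySem.Str.strip (if item = "" then "" else item)
  if value = "" ∨ PySem.Set.contains st.1.2 value then st
  else ((st.1.1 ++ [value], PySem.Set.add st.1.2 value), st.2 + 1)

def merge_proxies_py (existing : List String) (incoming : List String) : List String × Int :=
  let s1 := existing.foldl pvStepA ([], PySem.Set.empty)
  let s2 := incoming.foldl pvStepA2 (s1, 0)
  (s2.1.1, s2.2)

-- ===== PORT B =====
-- B's dedup helper: one pass, keep v if nonempty and unseen
def pvStepB (st : List String × PySem.Set String) (item : String) : List String × PySem.Set String :=
  let v := PySem.Str.strip (if item = "" then "" else item)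
  if v ≠ "" ∧ ¬ PySem.Set.contains st.2 v then (st.1 ++ [v], PySem.Set.add st.2 v) else st

def pvDedup (items : List String) : List String :=
  (items.foldl pvStepB ([], PySem.Set.empty)).1

def merge_proxies_py_alt (existing : List String) (incoming : List String) : List String × Int :=
  let base := pvDedup existing
  let merged := pvDedup (existing ++ incoming)
  (merged, (merged.length : Int) - (base.length : Int))

-- ===== PRECONDITION & SPEC =====
def Spec_merge_proxies_py (existing : List String) (incoming : List String) (out : List String × Int) : Prop := out = merge_proxies_py_alt existing incoming
instance (existing : List String) (incoming : List String) (out : List String × Int) : Decidable (Spec_merge_proxies_py existing incoming out) := by unfold Spec_merge_proxies_py; infer_instance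

-- ===== CLAIM (what is proved, stated in full; the proofs are below) =====
def Claim_equal_merge_proxies_py : Prop := ∀ (existing : List String) (incoming : List String), Dom_merge_proxies_py existing incoming → Spec_merge_proxies_py existing incoming (merge_proxies_py existing incoming)

-- ===== LEMMAS AND PROOFS =====

theorem pvStepB_eq_pvStepA : pvStepB = pvStepA := by
  funext st item
  simp only [pvStepA, pvStepB]
  by_cases h : PySem.Str.strip (if item = "" then "" else item) = "" ∨
      PySem.Set.contains st.2 (PySem.Str.strip (if item = "" then "" else item))
  · rw [if_pos h, if_neg (by tauto)]
  · rw [if_neg h, if_pos (by tauto)]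

-- A's second loop = the plain dedup fold, with 'added' tracking the growth of merged
theorem foldl_pvStepA2 (ys : List String) (st : List String × PySem.Set String) (a : Int) :
    ys.foldl pvStepA2 (st, a) =
      (ys.foldl pvStepA st,
       a + (((ys.foldl pvStepA st).1.length : Int) - (st.1.length : Int))) := by
  induction ys generalizing st a with
  | nil => simp
  | cons y ys ih =>
    simp only [List.foldl_cons]
    by_cases h : PySem.Str.strip (if y = "" then "" else y) = "" ∨
        PySem.Set.contains st.2 (PySem.Str.strip (if y = "" then "" else y))
    · rw [show pvStepA2 (st, a) y = (st, a) by simp only [pvStepA2]; rw [if_pos h],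
        show pvStepA st y = st by simp only [pvStepA]; rw [if_pos h], ih]
    · rw [show pvStepA2 (st, a) y
          = ((st.1 ++ [PySem.Str.strip (if y = "" then "" else y)],
              PySem.Set.add st.2 (PySem.Str.strip (if y = "" then "" else y))), a + 1) by
            simp only [pvStepA2]; rw [if_neg h],
        show pvStepA st y
          = (st.1 ++ [PySem.Str.strip (if y = "" then "" else y)],
              PySem.Set.add st.2 (PySem.Str.strip (if y = "" then "" else y))) by
            simp only [pvStepA]; rw [if_neg h],
        ih]
      congr 1
      simp only [List.length_append, List.length_cons, List.length_nil]
      push_cast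
      ring

-- ===== VERDICT (by name: the statement is the Claim_ definition above) =====
theorem merge_proxies_py_spec : Claim_equal_merge_proxies_py := by
  intro existing incoming _
  simp only [Spec_merge_proxies_py, merge_proxies_py, merge_proxies_py_alt, pvDedup,
    pvStepB_eq_pvStepA, List.foldl_append, foldl_pvStepA2]
  simp
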